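-- pv_equiv track=rewrite | github.com/ThomasJackDalby/advent-of-code | 2021/02/day_2.py | part_2
-- ===== SOURCE A (Python) =====
-- FORWARD = 0
--
-- UP = 1
--
-- def part_2(commands):
--     position, depth, aim = 0, 0, 0
--     for command, amount in commands:
--         if command == FORWARD:
--             position += amount
--             depth += amount * aim
--         elif command == UP:
--             aim -= amount
--         else:
--             aim += amount
--     return position * depth
-- ===== SOURCE B (Python) =====
-- def part_2(commands):
--     # Pass 1: running-aim table (aims[i] = aim before command i).
--     aims = [0]
--     for command, amount in commands:
--         if command == 0:
--             d = 0
--         elif command == 1: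
--             d = -amount
--         else:
--             d = amount
--         aims.append(aims[-1] + d)
--     # Pass 2: reductions over commands zipped with their aim-before values.
--     position = sum(amount for (command, amount), _ in zip(commands, aims) if command == 0)
--     depth = sum(amount * aim for (command, amount), aim in zip(commands, aims) if command == 0)
--     return position * depth
-- ===== Notes on version B (the rewrite author's own statement) =====
-- stated objective: alternative
-- what changed: Replaces A's single fused scan over (position, depth, aim) state by a prefix-sum table of running aims built in one pass, followed by two independent zip-reductions over forward commands for position and depth.
import Mathlib
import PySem

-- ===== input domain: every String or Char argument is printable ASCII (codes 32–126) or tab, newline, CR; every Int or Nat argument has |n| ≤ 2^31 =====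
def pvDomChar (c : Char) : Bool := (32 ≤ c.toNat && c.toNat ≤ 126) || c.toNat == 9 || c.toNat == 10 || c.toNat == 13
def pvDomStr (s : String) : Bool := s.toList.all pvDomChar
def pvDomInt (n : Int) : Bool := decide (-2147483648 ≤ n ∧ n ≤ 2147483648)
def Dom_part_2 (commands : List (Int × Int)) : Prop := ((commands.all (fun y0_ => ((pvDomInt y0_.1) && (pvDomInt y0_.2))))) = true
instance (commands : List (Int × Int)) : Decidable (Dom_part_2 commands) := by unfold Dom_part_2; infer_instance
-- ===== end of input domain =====

-- B replaces A's fused (position, depth, aim) scan by a prefix-sum table of running aims plus two zip-reductions; alternative decomposition, same cost.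


-- ===== PORT A =====
def part_2 (commands : List (Int × Int)) : Int :=
  let st := commands.foldl (fun (st : Int × Int × Int) p =>
      if p.1 = 0 then (st.1 + p.2, st.2.1 + p.2 * st.2.2, st.2.2)
      else if p.1 = 1 then (st.1, st.2.1, st.2.2 - p.2)
      else (st.1, st.2.1, st.2.2 + p.2)) (0, 0, 0)
  st.1 * st.2.1

-- ===== PORT B =====
-- aim delta of one command (the if/elif/else computing d in Source B)
def pvDelta (c a : Int) : Int := if c = 0 then 0 else if c = 1 then -a else a

def part_2_alt (commands : List (Int × Int)) : Int :=
  -- pass 1: running-aim table (aims[-1] = getLast!, list always nonempty)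
  let aims := commands.foldl (fun (st : List Int) p => st ++ [st.getLast! + pvDelta p.1 p.2]) [0]
  -- pass 2: two zip-reductions over forward commands
  let position := (commands.zip aims).foldl (fun s q => if q.1.1 = 0 then s + q.1.2 else s) 0
  let depth := (commands.zip aims).foldl (fun s q => if q.1.1 = 0 then s + q.1.2 * q.2 else s) 0
  position * depth

-- ===== PRECONDITION & SPEC =====
def Spec_part_2 (commands : List (Int × Int)) (out : Int) : Prop := out = part_2_alt commands
instance (commands : List (Int × Int)) (out : Int) : Decidable (Spec_part_2 commands out) := by unfold Spec_part_2; infer_instance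

-- ===== CLAIM (what is proved, stated in full; the proofs are below) =====
def Claim_equal_part_2 : Prop := ∀ (commands : List (Int × Int)), Dom_part_2 commands → Spec_part_2 commands (part_2 commands)

-- ===== LEMMAS AND PROOFS =====

-- sum of forward amounts
def pvP : List (Int × Int) → Int
  | [] => 0
  | p :: cs => (if p.1 = 0 then p.2 else 0) + pvP cs

-- sum of amount * (aim before the command) over forward commands, starting aim = a0
def pvD (a0 : Int) : List (Int × Int) → Int
  | [] => 0
  | p :: cs => (if p.1 = 0 then p.2 * a0 else 0) + pvD (a0 + pvDelta p.1 p.2) cs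

-- aims after the first, starting from aim a0
def pvTail (a0 : Int) : List (Int × Int) → List Int
  | [] => []
  | p :: cs => (a0 + pvDelta p.1 p.2) :: pvTail (a0 + pvDelta p.1 p.2) cs

-- final aim
def pvAimEnd (a0 : Int) : List (Int × Int) → Int
  | [] => a0
  | p :: cs => pvAimEnd (a0 + pvDelta p.1 p.2) cs

theorem foldA_eq (cs : List (Int × Int)) : ∀ (pos dep aim : Int),
    cs.foldl (fun (st : Int × Int × Int) p =>
      if p.1 = 0 then (st.1 + p.2, st.2.1 + p.2 * st.2.2, st.2.2)
      else if p.1 = 1 then (st.1, st.2.1, st.2.2 - p.2)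
      else (st.1, st.2.1, st.2.2 + p.2)) (pos, dep, aim)
    = (pos + pvP cs, dep + pvD aim cs, pvAimEnd aim cs) := by
  induction cs with
  | nil => intro pos dep aim; simp [pvP, pvD, pvAimEnd]
  | cons p cs ih =>
    intro pos dep aim
    by_cases h0 : p.1 = 0
    · simp only [List.foldl, h0, if_pos, ih, pvP, pvD, pvDelta, pvAimEnd]
      simp
      exact ⟨by ring, by ring⟩
    · by_cases h1 : p.1 = 1
      · simp only [List.foldl, ih, pvP, pvD, pvDelta, pvAimEnd]
        simp [h1, sub_eq_add_neg]
      · simp only [List.foldl, ih, pvP, pvD, pvDelta, pvAimEnd]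
        simp [h0, h1]

theorem pvLast_concat (l : List Int) (x : Int) : (l ++ [x]).getLast! = x := by
  cases h : l ++ [x] with
  | nil => simp at h
  | cons b t => simp [List.getLast!, ← h]

theorem foldB_build (cs : List (Int × Int)) : ∀ (l : List Int) (x : Int),
    cs.foldl (fun (st : List Int) p => st ++ [st.getLast! + pvDelta p.1 p.2]) (l ++ [x])
    = (l ++ [x]) ++ pvTail x cs := by
  induction cs with
  | nil => intro l x; simp [pvTail]
  | cons p cs ih =>
    intro l x
    simp only [List.foldl, pvLast_concat]
    rw [ih (l ++ [x]) (x + pvDelta p.1 p.2)]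
    simp [pvTail]

theorem posZip (cs : List (Int × Int)) : ∀ (a0 s : Int),
    (cs.zip (a0 :: pvTail a0 cs)).foldl (fun s q => if q.1.1 = 0 then s + q.1.2 else s) s
    = s + pvP cs := by
  induction cs with
  | nil => intro a0 s; simp [pvP]
  | cons p cs ih =>
    intro a0 s
    simp only [pvTail, List.zip_cons_cons, List.foldl, pvP]
    by_cases h0 : p.1 = 0 <;> simp [h0, ih] <;> ring

theorem depZip (cs : List (Int × Int)) : ∀ (a0 s : Int),
    (cs.zip (a0 :: pvTail a0 cs)).foldl (fun s q => if q.1.1 = 0 then s + q.1.2 * q.2 else s) s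
    = s + pvD a0 cs := by
  induction cs with
  | nil => intro a0 s; simp [pvD]
  | cons p cs ih =>
    intro a0 s
    simp only [pvTail, List.zip_cons_cons, List.foldl, pvD]
    by_cases h0 : p.1 = 0 <;> simp [h0, pvDelta, ih] <;> ring

theorem alt_eq (cs : List (Int × Int)) : part_2_alt cs = pvP cs * pvD 0 cs := by
  unfold part_2_alt
  have hb := foldB_build cs [] 0
  simp only [List.nil_append] at hb
  simp only [hb]
  have hz : ([(0 : Int)] ++ pvTail 0 cs) = (0 : Int) :: pvTail 0 cs := rfl
  rw [hz, posZip, depZip]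
  ring

-- ===== VERDICT (by name: the statement is the Claim_ definition above) =====
theorem part_2_spec : Claim_equal_part_2 := by
  intro cs _
  show part_2 cs = part_2_alt cs
  unfold part_2
  rw [foldA_eq, alt_eq]
  ring
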